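-- pv_equiv track=rewrite | github.com/vamotest/yandex_algorithms | Sprint 13. Topic 3. Final tasks/v.2/A. Photocopies.py | get_max_photocopy
-- ===== SOURCE A (Python) =====
-- def get_max_photocopy(dc_quantity, dc_capacity, count_photos=0):
--
--     if dc_quantity > 1:
--         dc_capacity.sort()
--
--         while dc_capacity[-2] > 0:
--             dc_capacity[-1] -= 1
--             dc_capacity[-2] -= 1
--             count_photos += 1
--             dc_capacity.sort()
--         return count_photos
--
--     return count_photos
-- ===== SOURCE B (Python) =====
-- def get_max_photocopy(dc_quantity, dc_capacity, count_photos=0):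
--     # Closed form: repeatedly decrementing the two largest positive capacities
--     # pairs off min(S // 2, S - M) photos, where S is the total positive
--     # capacity and M its largest single term. (Return value only: unlike A,
--     # this does not sort or mutate dc_capacity.)
--     if dc_quantity <= 1:
--         return count_photos
--     pos = [c for c in dc_capacity if c > 0]
--     s = sum(pos)
--     m = max(pos, default=0)
--     return count_photos + min(s // 2, s - m)
-- ===== Notes on version B (the rewrite author's own statement) =====
-- stated objective: faster
-- what changed: Replaces A's simulate-and-resort loop (repeatedly decrement the two largest capacities until the second-largest is <= 0) by the one-pass closed form count_photos + min(S // 2, S - M) over the positive capacities, where S is their sum and M their maximum.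
import Mathlib
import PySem

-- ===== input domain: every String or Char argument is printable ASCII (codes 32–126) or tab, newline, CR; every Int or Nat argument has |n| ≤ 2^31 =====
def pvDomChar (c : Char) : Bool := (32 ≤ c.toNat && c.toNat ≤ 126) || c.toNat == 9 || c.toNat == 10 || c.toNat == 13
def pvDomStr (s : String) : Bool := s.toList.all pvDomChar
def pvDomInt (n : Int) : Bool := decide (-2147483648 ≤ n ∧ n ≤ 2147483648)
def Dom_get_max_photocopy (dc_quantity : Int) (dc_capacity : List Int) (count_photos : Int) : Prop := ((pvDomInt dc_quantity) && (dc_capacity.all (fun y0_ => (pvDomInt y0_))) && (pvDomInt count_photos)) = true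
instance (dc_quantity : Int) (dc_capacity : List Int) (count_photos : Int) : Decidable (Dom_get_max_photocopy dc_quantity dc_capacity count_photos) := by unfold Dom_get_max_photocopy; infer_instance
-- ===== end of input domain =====

-- B replaces A's simulate-and-resort loop by the closed form count + min(S//2, S - M) over the
-- positive capacities (asymptotically faster). Equivalence is about the RETURN value only:
-- A sorts/mutates dc_capacity in place, B leaves it untouched.

-- ===== PORT A =====
-- helpers for A's loop (dc_capacity[-1] -= 1; dc_capacity[-2] -= 1) and its termination measure
def pvDecLastTwo (l : List Int) : List Int :=
  match l.reverse with
  | a :: b :: rest => ((a - 1) :: (b - 1) :: rest).reverse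
  | _ => l

def pvPosSum (l : List Int) : Nat := (l.map Int.toNat).sum

lemma pvPosSum_append (xs ys : List Int) : pvPosSum (xs ++ ys) = pvPosSum xs + pvPosSum ys := by
  simp [pvPosSum]

lemma pvPosSum_perm {l₁ l₂ : List Int} (h : l₁.Perm l₂) : pvPosSum l₁ = pvPosSum l₂ :=
  (h.map Int.toNat).sum_eq

lemma pvPyGet?_neg_two (a b : Int) (rest : List Int) :
    PySem.List.pyGet? (rest.reverse ++ [b, a]) (-2) = some b := by
  rw [PySem.List.pyGet?_neg_ofNat _ 2 (by omega) (by simp)]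
  simp

lemma pvDecLastTwo_eq (a b : Int) (rest : List Int) :
    pvDecLastTwo (rest.reverse ++ [b, a]) = rest.reverse ++ [b - 1, a - 1] := by
  unfold pvDecLastTwo
  rw [show (rest.reverse ++ [b, a]).reverse = a :: b :: rest by simp]
  simp

-- termination of A's while-loop: each iteration strictly lowers the total positive capacity
lemma pvPosSum_dec_lt (l : List Int) (v : Int)
    (h : PySem.List.pyGet? l (-2) = some v) (hv : 0 < v) :
    pvPosSum (PySem.List.sorted (pvDecLastTwo l) (fun x => x) false) < pvPosSum l := by
  rcases hrev : l.reverse with _ | ⟨a, t⟩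
  · have hnil : l = [] := by simpa using congrArg List.reverse hrev
    subst hnil; simp [PySem.List.pyGet?] at h
  rcases t with _ | ⟨b, rest⟩
  · have hone : l = [a] := by simpa using congrArg List.reverse hrev
    subst hone
    rw [(PySem.List.pyGet?_eq_none_iff _ _).2 (by simp [PySem.Raise.InRange])] at h
    exact absurd h (by simp)
  · have hl : l = rest.reverse ++ [b, a] := by
      have h2 := congrArg List.reverse hrev
      simpa using h2
    subst hl
    rw [pvPyGet?_neg_two] at h
    have hb : b = v := by simpa using h
    subst v
    rw [pvPosSum_perm (PySem.List.sorted_perm _ _ _), pvDecLastTwo_eq,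
      pvPosSum_append, pvPosSum_append]
    have h1 : (b - 1).toNat < b.toNat := by omega
    have h2 : (a - 1).toNat ≤ a.toNat := by omega
    simp only [pvPosSum, List.map_cons, List.map_nil, List.sum_cons, List.sum_nil]
    omega

def pvALoop (l : List Int) (count_photos : Int) : Int :=
  match h : PySem.List.pyGet? l (-2) with          -- while dc_capacity[-2] > 0
  | none => count_photos                            -- (unreachable under Pre_: Python raises IndexError)
  | some v =>
    if hv : 0 < v then
      -- dc_capacity[-1] -= 1; dc_capacity[-2] -= 1; count_photos += 1; dc_capacity.sort()
      pvALoop (PySem.List.sorted (pvDecLastTwo l) (fun x => x) false) (count_photos + 1)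
    else count_photos
termination_by pvPosSum l
decreasing_by exact pvPosSum_dec_lt l v h hv

def get_max_photocopy (dc_quantity : Int) (dc_capacity : List Int) (count_photos : Int) : Int :=
  if 1 < dc_quantity then
    pvALoop (PySem.List.sorted dc_capacity (fun x => x) false) count_photos
  else count_photos

-- ===== PORT B =====
def get_max_photocopy_alt (dc_quantity : Int) (dc_capacity : List Int) (count_photos : Int) : Int :=
  if dc_quantity ≤ 1 then count_photos
  else
    let pos := dc_capacity.filter (fun c => decide (0 < c))
    let s := pos.sum
    let m := PySem.List.maxD pos (fun x => x) 0     -- max(pos, default=0)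
    count_photos + min (PySem.Int.floordiv s 2) (s - m)

-- ===== PRECONDITION & SPEC =====
-- Pre_ excludes exactly the inputs on which A raises IndexError at dc_capacity[-2]:
-- dc_quantity > 1 with fewer than two capacities.
def Pre_get_max_photocopy (dc_quantity : Int) (dc_capacity : List Int) (count_photos : Int) : Prop :=
  1 < dc_quantity → 2 ≤ dc_capacity.length
instance (dc_quantity : Int) (dc_capacity : List Int) (count_photos : Int) : Decidable (Pre_get_max_photocopy dc_quantity dc_capacity count_photos) := by unfold Pre_get_max_photocopy; infer_instance

def pvWitness_get_max_photocopy : Int × List Int × Int := (2, [1, 2], 0)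

def Spec_get_max_photocopy (dc_quantity : Int) (dc_capacity : List Int) (count_photos : Int) (out : Int) : Prop := out = get_max_photocopy_alt dc_quantity dc_capacity count_photos
instance (dc_quantity : Int) (dc_capacity : List Int) (count_photos : Int) (out : Int) : Decidable (Spec_get_max_photocopy dc_quantity dc_capacity count_photos out) := by unfold Spec_get_max_photocopy; infer_instance

-- ===== CLAIM (what is proved, stated in full; the proofs are below) =====
def Claim_equal_get_max_photocopy : Prop := ∀ (dc_quantity : Int) (dc_capacity : List Int) (count_photos : Int), Dom_get_max_photocopy dc_quantity dc_capacity count_photos → Pre_get_max_photocopy dc_quantity dc_capacity count_photos → Spec_get_max_photocopy dc_quantity dc_capacity count_photos (get_max_photocopy dc_quantity dc_capacity count_photos)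


-- ===== LEMMAS AND PROOFS =====
-- abbreviations (proof-only): positive capacities, their sum, their maximum (0 if none)
def pvPos (l : List Int) : List Int := l.filter (fun c => decide (0 < c))
def pvS (l : List Int) : Int := (pvPos l).sum
def pvM (l : List Int) : Int := PySem.List.maxD (pvPos l) (fun x => x) 0

lemma pvS_cons (x : Int) (t : List Int) :
    pvS (x :: t) = (if 0 < x then x else 0) + pvS t := by
  simp only [pvS, pvPos, List.filter_cons]
  split_ifs with h <;> simp_all

lemma pvS_nonneg (l : List Int) : 0 ≤ pvS l := by
  apply List.sum_nonneg
  intro x hx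
  have := (List.mem_filter.1 hx).2
  simp at this; omega

lemma pvS_perm {l₁ l₂ : List Int} (h : l₁.Perm l₂) : pvS l₁ = pvS l₂ :=
  (h.filter _).sum_eq

lemma pvM_spec (l : List Int) (hne : pvPos l ≠ []) :
    pvM l ∈ pvPos l ∧ ∀ y ∈ pvPos l, y ≤ pvM l := by
  constructor
  · exact PySem.List.maxD_mem _ _ _ hne
  · exact PySem.List.max?_id_le (PySem.List.max?_eq_some_maxD _ _ 0 hne)

lemma pvM_nonneg (l : List Int) : 0 ≤ pvM l := by
  by_cases hne : pvPos l = []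
  · simp [pvM, hne, PySem.List.maxD_nil]
  · have := (pvM_spec l hne).1
    have := (List.mem_filter.1 this).2
    simp at this; omega

lemma pvM_eq (l : List Int) (x : Int) (hx : x ∈ pvPos l)
    (hmax : ∀ y ∈ pvPos l, y ≤ x) : pvM l = x := by
  have hne : pvPos l ≠ [] := by intro h; rw [h] at hx; simp at hx
  obtain ⟨hmem, hub⟩ := pvM_spec l hne
  exact le_antisymm (hmax _ hmem) (hub _ hx)

lemma pvM_perm {l₁ l₂ : List Int} (h : l₁.Perm l₂) : pvM l₁ = pvM l₂ := by
  have hp : (pvPos l₁).Perm (pvPos l₂) := h.filter _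
  by_cases hne : pvPos l₁ = []
  · have : pvPos l₂ = [] := by
      have := hp; rw [hne] at this; exact this.symm.eq_nil
    simp [pvM, hne, this, PySem.List.maxD_nil]
  · have hne₂ : pvPos l₂ ≠ [] := fun h2 => hne (by
      rw [h2] at hp; exact hp.eq_nil)
    obtain ⟨m1, u1⟩ := pvM_spec l₁ hne
    obtain ⟨m2, u2⟩ := pvM_spec l₂ hne₂
    exact le_antisymm (u2 _ (hp.mem_iff.1 m1)) (u1 _ (hp.symm.mem_iff.1 m2))

-- the closed form is 0 once the second-largest capacity is ≤ 0
lemma pvTerminal (a b : Int) (rest : List Int) (hb : ¬ 0 < b)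
    (hrest : ∀ x ∈ rest, x ≤ b) :
    min (PySem.Int.floordiv (pvS (a :: b :: rest)) 2)
      (pvS (a :: b :: rest) - pvM (a :: b :: rest)) = 0 := by
  have hrestnil : pvPos rest = [] := by
    simp only [pvPos, List.filter_eq_nil_iff]
    intro x hx; have := hrest x hx; simp; omega
  have hSrest : pvS rest = 0 := by simp [pvS, hrestnil]
  rw [show PySem.Int.floordiv (pvS (a :: b :: rest)) 2 = pvS (a :: b :: rest) / 2 from
    PySem.Int.floordiv_eq_ediv_of_pos (by omega)]
  by_cases ha : 0 < a
  · have hpos : pvPos (a :: b :: rest) = [a] := by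
      simp only [pvPos, List.filter_cons]
      simp [ha, hb]
      simpa [pvPos] using hrestnil
    have hS : pvS (a :: b :: rest) = a := by simp [pvS, hpos]
    have hM : pvM (a :: b :: rest) = a := by
      have : pvM (a :: b :: rest) = PySem.List.maxD [a] (fun x => x) 0 := by rw [pvM, hpos]
      rw [this, PySem.List.maxD_id_cons]; simp
    rw [hS, hM]
    omega
  · have hpos : pvPos (a :: b :: rest) = [] := by
      simp only [pvPos, List.filter_cons]
      simp [ha, hb]
      simpa [pvPos] using hrestnil
    have hS : pvS (a :: b :: rest) = 0 := by simp [pvS, hpos]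
    have hM : pvM (a :: b :: rest) = 0 := by rw [pvM, hpos, PySem.List.maxD_nil]
    rw [hS, hM]
    decide

-- one loop iteration: decrementing the top two (b = second-largest > 0) lowers the closed form by 1
lemma pvStep (a b : Int) (rest : List Int) (hb : 0 < b) (hba : b ≤ a)
    (hrest : ∀ x ∈ rest, x ≤ b) :
    1 + min (PySem.Int.floordiv (pvS ((a - 1) :: (b - 1) :: rest)) 2)
          (pvS ((a - 1) :: (b - 1) :: rest) - pvM ((a - 1) :: (b - 1) :: rest))
      = min (PySem.Int.floordiv (pvS (a :: b :: rest)) 2)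
          (pvS (a :: b :: rest) - pvM (a :: b :: rest)) := by
  have ha : 0 < a := by omega
  have hs := pvS_nonneg rest
  have hS0 : pvS (a :: b :: rest) = a + b + pvS rest := by
    rw [pvS_cons, pvS_cons]; rw [if_pos ha, if_pos hb]; ring
  have hS1 : pvS ((a - 1) :: (b - 1) :: rest) = (a - 1) + (b - 1) + pvS rest := by
    rw [pvS_cons, pvS_cons]
    split_ifs <;> omega
  have hM0 : pvM (a :: b :: rest) = a := by
    apply pvM_eq
    · exact List.mem_filter.2 ⟨List.mem_cons_self, by simpa using ha⟩
    · intro y hy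
      have hy' := (List.mem_filter.1 hy).1
      simp only [List.mem_cons] at hy'
      rcases hy' with rfl | rfl | hy'
      · omega
      · omega
      · have := hrest _ hy'; omega
  have hup : ∀ y ∈ pvPos ((a - 1) :: (b - 1) :: rest), y ≤ a := by
    intro y hy
    have hy' := (List.mem_filter.1 hy).1
    simp only [List.mem_cons] at hy'
    rcases hy' with rfl | rfl | hy'
    · omega
    · omega
    · have := hrest _ hy'; omega
  have hM'le : pvM ((a - 1) :: (b - 1) :: rest) ≤ a := by
    by_cases hne : pvPos ((a - 1) :: (b - 1) :: rest) = []
    · simp [pvM, hne, PySem.List.maxD_nil]; omega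
    · exact hup _ (pvM_spec _ hne).1
  have hM'ge : a - 1 ≤ pvM ((a - 1) :: (b - 1) :: rest) := by
    by_cases ha1 : 0 < a - 1
    · have hmem : a - 1 ∈ pvPos ((a - 1) :: (b - 1) :: rest) :=
        List.mem_filter.2 ⟨List.mem_cons_self, by simpa using ha1⟩
      have hne : pvPos ((a - 1) :: (b - 1) :: rest) ≠ [] := by
        intro h; rw [h] at hmem; simp at hmem
      exact (pvM_spec _ hne).2 _ hmem
    · have := pvM_nonneg ((a - 1) :: (b - 1) :: rest); omega
  rw [show PySem.Int.floordiv (pvS ((a - 1) :: (b - 1) :: rest)) 2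
      = pvS ((a - 1) :: (b - 1) :: rest) / 2 from PySem.Int.floordiv_eq_ediv_of_pos (by omega),
    show PySem.Int.floordiv (pvS (a :: b :: rest)) 2
      = pvS (a :: b :: rest) / 2 from PySem.Int.floordiv_eq_ediv_of_pos (by omega)]
  by_cases hMa : pvM ((a - 1) :: (b - 1) :: rest) = a
  · -- a occurs again in rest: S ≥ 3a
    have hne : pvPos ((a - 1) :: (b - 1) :: rest) ≠ [] := by
      intro h
      rw [pvM, h, PySem.List.maxD_nil] at hMa; omega
    have hmem : a ∈ pvPos ((a - 1) :: (b - 1) :: rest) := by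
      have h0 := (pvM_spec _ hne).1
      rw [hMa] at h0; exact h0
    have hmem' := (List.mem_filter.1 hmem).1
    simp only [List.mem_cons] at hmem'
    have harest : a ∈ rest := by
      rcases hmem' with h | h | h
      · omega
      · omega
      · exact h
    have haS : a ≤ pvS rest := by
      apply List.single_le_sum
      · intro x hx
        have := (List.mem_filter.1 hx).2
        simp at this; omega
      · exact List.mem_filter.2 ⟨harest, by simpa using ha⟩
    rw [hS0, hS1, hM0, hMa]
    omega
  · rw [hS0, hS1, hM0]
    have : pvM ((a - 1) :: (b - 1) :: rest) = a - 1 := by omega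
    rw [this]
    omega

lemma pvPermRev (a b : Int) (rest : List Int) :
    (rest.reverse ++ [b, a]).Perm (a :: b :: rest) :=
  ((rest.reverse_perm.append_right [b, a]).trans List.perm_append_comm).trans
    (List.Perm.swap a b rest)

lemma pvALoop_eq (l : List Int) (v : Int) (h : PySem.List.pyGet? l (-2) = some v)
    (c : Int) :
    pvALoop l c = if 0 < v then
        pvALoop (PySem.List.sorted (pvDecLastTwo l) (fun x => x) false) (c + 1)
      else c := by
  rw [pvALoop]
  split
  · next h' => rw [h'] at h; simp at h
  · next w h' =>
    rw [h'] at h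
    have : w = v := by simpa using h
    subst this
    rfl

lemma pvALoop_formula (n : Nat) : ∀ (l : List Int) (cnt : Int), pvPosSum l = n →
    List.Pairwise (· ≤ ·) l → 2 ≤ l.length →
    pvALoop l cnt = cnt + min (PySem.Int.floordiv (pvS l) 2) (pvS l - pvM l) := by
  induction n using Nat.strong_induction_on with
  | _ n ih =>
    intro l cnt hn hpair hlen
    rcases hrev : l.reverse with _ | ⟨a, t⟩
    · have hnil : l = [] := by simpa using congrArg List.reverse hrev
      subst hnil; simp at hlen
    rcases t with _ | ⟨b, rest⟩
    · have hone : l = [a] := by simpa using congrArg List.reverse hrev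
      subst hone; simp at hlen
    have hl : l = rest.reverse ++ [b, a] := by
      have h2 := congrArg List.reverse hrev
      simpa using h2
    subst hl
    rw [List.pairwise_append] at hpair
    obtain ⟨hp1, hp2, hcross⟩ := hpair
    have hba : b ≤ a := by
      simp only [List.pairwise_cons] at hp2
      exact hp2.1 a (by simp)
    have hrest : ∀ x ∈ rest, x ≤ b := by
      intro x hx
      exact hcross x (by simpa using hx) b (by simp)
    have hperm := pvPermRev a b rest
    rw [pvALoop_eq _ b (pvPyGet?_neg_two a b rest) cnt]
    by_cases hb : 0 < b
    · rw [if_pos hb]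
      have hdec : pvDecLastTwo (rest.reverse ++ [b, a]) = rest.reverse ++ [b - 1, a - 1] :=
        pvDecLastTwo_eq a b rest
      have hperm' : (PySem.List.sorted (pvDecLastTwo (rest.reverse ++ [b, a])) (fun x => x)
          false).Perm ((a - 1) :: (b - 1) :: rest) := by
        rw [hdec]
        exact (PySem.List.sorted_perm _ _ _).trans (pvPermRev (a - 1) (b - 1) rest)
      have hlt : pvPosSum (PySem.List.sorted (pvDecLastTwo (rest.reverse ++ [b, a]))
          (fun x => x) false) < n := by
        rw [← hn]
        exact pvPosSum_dec_lt _ b (pvPyGet?_neg_two a b rest) hb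
      have hpair' : List.Pairwise (fun x1 x2 => x1 ≤ x2) (PySem.List.sorted (pvDecLastTwo (rest.reverse ++ [b, a])) (fun x => x) false) := by
        simpa using PySem.List.sorted_pairwise (pvDecLastTwo (rest.reverse ++ [b, a])) (fun x => x)
      have hlen' : 2 ≤ (PySem.List.sorted (pvDecLastTwo (rest.reverse ++ [b, a])) (fun x => x) false).length := by
        rw [PySem.List.length_sorted, hdec]
        simp
      have hrec := ih _ hlt _ (cnt + 1) rfl hpair' hlen'
      rw [hrec, pvS_perm hperm', pvM_perm hperm', pvS_perm hperm, pvM_perm hperm]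
      have hstep := pvStep a b rest hb hba hrest
      omega
    · rw [if_neg hb]
      rw [pvS_perm hperm, pvM_perm hperm]
      have hterm := pvTerminal a b rest hb hrest
      omega

theorem pv_main (dc_quantity : Int) (dc_capacity : List Int) (count_photos : Int)
    (hpre : Pre_get_max_photocopy dc_quantity dc_capacity count_photos) :
    get_max_photocopy dc_quantity dc_capacity count_photos
      = get_max_photocopy_alt dc_quantity dc_capacity count_photos := by
  unfold get_max_photocopy get_max_photocopy_alt
  by_cases hq : 1 < dc_quantity
  · rw [if_pos hq, if_neg (by omega)]
    have hlen := hpre hq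
    have hperm := PySem.List.sorted_perm dc_capacity (fun x => x) false
    rw [pvALoop_formula (pvPosSum (PySem.List.sorted dc_capacity (fun x => x) false)) _ _ rfl
      (by simpa using PySem.List.sorted_pairwise dc_capacity (fun x => x))
      (by rw [PySem.List.length_sorted]; omega)]
    rw [pvS_perm hperm, pvM_perm hperm]
    rfl
  · rw [if_neg hq, if_pos (by omega)]

-- ===== VERDICT (by name: the statement is the Claim_ definition above) =====
theorem get_max_photocopy_spec : Claim_equal_get_max_photocopy := by
  intro q cap cnt _ hpre
  exact pv_main q cap cnt hpre
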